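-- pv_equiv track=rewrite | github.com/David-Nevezi-Strango/Cryptool | cipher.py | bifid_encrypt
-- ===== SOURCE A (Python) =====
-- def polybius_make_table(key=""):
--     alphabet = "ABCDEFGHIKLMNOPQRSTUVWXYZ"
--     intermediate = ""
--     table = []
--
--     for char in key + alphabet:
--         if char not in intermediate:
--             intermediate += char
--
--     for index in range(0, 25, 5):
--         row = intermediate[index:(index + 5)]
--         table.append(row)
--
--     return table
--
-- def polybius_search(char, table):
--     for row_index in range(len(table)):
--         for col_index in range(len(table[0])):
--             if char == table[row_index][col_index]:
--                 return row_index, col_index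
--
--     return None, None
--
-- def bifid_encrypt(message: str, key: str) -> str:
--     row_result = ""
--     col_result = ""
--     table = polybius_make_table(key.upper())
--     message = message.upper().replace('J', 'I')
--
--     for character in message:
--         if character == " ":
--             continue
--         else:
--             i,j = polybius_search(character, table)
--             row_result += str(i + 1) if i is not None else ""
--             col_result += str(j + 1) if j is not None else ""
--
--     return polybius_decrypt(row_result + col_result, table)
--
-- def polybius_decrypt(message: str, table = None) -> str:
--     if not table:
--         table = polybius_make_table()
--     result = ""
--     index = 0
--
--     while index < len(message):
--         if message[index] == " ":
--             result += " "
--             index += 1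
--         else:
--             result += table[int(message[index]) - 1][int(message[index + 1]) - 1]
--             index += 2
--     return result
-- ===== SOURCE B (Python) =====
-- def bifid_encrypt(message: str, key: str) -> str:
--     alphabet = "ABCDEFGHIKLMNOPQRSTUVWXYZ"
--     # ordered dedup of key+alphabet, flat 25-char Polybius square
--     square = list(dict.fromkeys(key.upper() + alphabet))[:25]
--     idx = {ch: i for i, ch in enumerate(square)}
--     # single index list: position in the square of each kept message character
--     ks = [idx[ch] for ch in message.upper().replace('J', 'I') if ch != ' ' and ch in idx]
--     n = len(ks)
--
--     # the m-th output letter reads coordinates 2m and 2m+1 of the virtual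
--     # rows-then-cols sequence, computed on demand by index arithmetic
--     def coord(t):
--         return ks[t] // 5 if t < n else ks[t - n] % 5
--
--     return ''.join(square[5 * coord(2 * m) + coord(2 * m + 1)] for m in range(n))
-- ===== Notes on version B (the rewrite author's own statement) =====
-- stated objective: faster
-- what changed: B replaces A's 5x5 row-list table, per-character 25-cell nested-loop search, digit-string accumulation and the second decrypt pass through polybius_decrypt by one flat 25-char square with a char->index dict, a single list of square indices, and direct index arithmetic (ks[t]//5 / ks[t-n]%5) that reads each output letter's two coordinates on demand; no rows/cols strings or concatenated coordinate sequence is ever materialised.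
import Mathlib
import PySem

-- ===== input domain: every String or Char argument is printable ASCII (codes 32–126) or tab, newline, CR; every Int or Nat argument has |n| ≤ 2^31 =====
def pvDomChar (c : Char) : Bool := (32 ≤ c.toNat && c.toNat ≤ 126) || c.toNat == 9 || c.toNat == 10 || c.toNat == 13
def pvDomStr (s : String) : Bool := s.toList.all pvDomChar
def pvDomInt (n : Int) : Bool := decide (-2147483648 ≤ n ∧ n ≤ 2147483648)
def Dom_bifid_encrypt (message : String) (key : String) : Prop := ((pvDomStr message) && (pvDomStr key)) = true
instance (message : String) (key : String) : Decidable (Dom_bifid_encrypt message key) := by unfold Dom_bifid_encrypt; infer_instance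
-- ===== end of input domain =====

set_option maxHeartbeats 1000000


-- B replaces A's 5×5 table + per-character nested-loop search + digit-string round-trip by a
-- flat 25-char square, one list of square indices, and on-demand index arithmetic for each
-- output letter's two coordinates (objective: simpler).

-- ===== PORT A =====
-- Python strings are modelled as List Char ('char not in intermediate' on a string of
-- single chars is exactly list membership).
def polybius_make_table (key : String) : List (List Char) :=
  let alphabet := "ABCDEFGHIKLMNOPQRSTUVWXYZ"
  let intermediate : List Char :=
    (key ++ alphabet).toList.foldl (fun acc c => if c ∈ acc then acc else acc ++ [c]) []
  (PySem.List.pyRange 0 25 5).foldl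
    (fun table index => table ++ [PySem.List.slice intermediate (some index) (some (index + 5))]) []

-- Python returns (row_index, col_index) on a hit and (None, None) otherwise; the pair of
-- simultaneous Nones is modelled as 'none'.
def polybius_search (char : Char) (table : List (List Char)) : Option (Nat × Nat) :=
  (List.range table.length).findSome? (fun row_index =>
    (List.range (table.getD 0 []).length).findSome? (fun col_index =>
      if char = (table.getD row_index []).getD col_index ' ' then some (row_index, col_index)
      else none))

-- int(message[index]) via PySem.Int.ofStr? (getD 0 / pyGetD defaults sit exactly where the
-- Python raises ValueError/IndexError: on non-digit or odd-length input, which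
-- bifid_encrypt never produces).
def polybius_decrypt_go (table : List (List Char)) : List Char → List Char
  | [] => []
  | c :: rest =>
    if c = ' ' then ' ' :: polybius_decrypt_go table rest
    else
      match rest with
      | [] => []  -- Python raises IndexError here; unreachable from bifid_encrypt
      | d :: rest' =>
        PySem.List.pyGetD
            (PySem.List.pyGetD table ((PySem.Int.ofStr? (String.ofList [c])).getD 0 - 1) [])
            ((PySem.Int.ofStr? (String.ofList [d])).getD 0 - 1) ' '
          :: polybius_decrypt_go table rest'

def polybius_decrypt (message : List Char) (table : List (List Char)) : List Char :=
  let table := if table = [] then polybius_make_table "" else table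
  polybius_decrypt_go table message

def bifid_encrypt (message : String) (key : String) : String :=
  let table := polybius_make_table (PySem.Str.upper key)
  let msg := PySem.Chars.replace (PySem.Chars.upper message.toList) ['J'] ['I']
  let res := msg.foldl
    (fun (acc : List Char × List Char) character =>
      if character = ' ' then acc
      else
        match polybius_search character table with
        | some (i, j) =>
            (acc.1 ++ (PySem.Int.toStr ((i : Int) + 1)).toList,
             acc.2 ++ (PySem.Int.toStr ((j : Int) + 1)).toList)
        | none => acc)   -- '+= ""' on both accumulators
    ([], [])
  String.ofList (polybius_decrypt (res.1 ++ res.2) table)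

-- ===== PORT B =====
-- dict → association list (insertion order, first-match lookup), per the type convention;
-- the comprehension's 'if … and ch in idx' filter with value idx[ch] is the filterMap.
def bifid_encrypt_alt (message : String) (key : String) : String :=
  let alphabet := "ABCDEFGHIKLMNOPQRSTUVWXYZ"
  let square := (PySem.List.dedup (PySem.Str.upper key ++ alphabet).toList).take 25
  let pos : List (Char × Int) := (PySem.List.enumerate square).map (fun p => (p.2, p.1))
  let ks : List Int :=
    (PySem.Chars.replace (PySem.Chars.upper message.toList) ['J'] ['I']).filterMap
      (fun ch => if ch ≠ ' ' then List.lookup ch pos else none)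
  let n := ks.length
  let coord : Int → Int := fun t =>
    if t < (n : Int) then PySem.Int.floordiv (PySem.List.pyGetD ks t 0) 5
    else PySem.Int.mod (PySem.List.pyGetD ks (t - (n : Int)) 0) 5
  String.ofList ((List.range n).map (fun (m : Nat) =>
    PySem.List.pyGetD square (5 * coord (2 * (m : Int)) + coord (2 * (m : Int) + 1)) ' '))

-- ===== PRECONDITION & SPEC =====
def Spec_bifid_encrypt (message : String) (key : String) (out : String) : Prop := out = bifid_encrypt_alt message key
instance (message : String) (key : String) (out : String) : Decidable (Spec_bifid_encrypt message key out) := by unfold Spec_bifid_encrypt; infer_instance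

-- ===== CLAIM (what is proved, stated in full; the proofs are below) =====
def Claim_equal_bifid_encrypt : Prop := ∀ (message : String) (key : String), Dom_bifid_encrypt message key → Spec_bifid_encrypt message key (bifid_encrypt message key)


-- ===== LEMMAS AND PROOFS =====

-- digit of a coordinate 0..4 as Python's str(x+1) produces it
def pvDig (x : Nat) : Char := Char.ofNat (49 + x)

-- the common core both programs compute: consecutive coordinate pairs looked up in the flat square
def pvPairs (flat : List Char) : List Nat → List Char
  | a :: b :: r => flat.getD (a * 5 + b) ' ' :: pvPairs flat r
  | _ => []

-- the square-index of a kept message character (none: space or not in the square)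
def pvG (flat : List Char) (c : Char) : Option Nat :=
  if c = ' ' then none else List.idxOf? c flat

def pvGR (flat : List Char) (c : Char) : List Char :=
  match pvG flat c with | some k => [pvDig (k / 5)] | none => []

def pvGC (flat : List Char) (c : Char) : List Char :=
  match pvG flat c with | some k => [pvDig (k % 5)] | none => []

theorem pv_foldl_dedup (l acc : List Char) :
    l.foldl (fun acc c => if c ∈ acc then acc else acc ++ [c]) acc = l.foldl PySem.Set.add acc := by
  apply PySem.List.foldl_congr_mem
  intro a x _
  simp [PySem.Set.add, List.contains_eq_mem]

theorem pv_len25 (s : List Char) :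
    25 ≤ (PySem.List.dedup (s ++ "ABCDEFGHIKLMNOPQRSTUVWXYZ".toList)).length := by
  have hsub : "ABCDEFGHIKLMNOPQRSTUVWXYZ".toList ⊆
      PySem.List.dedup (s ++ "ABCDEFGHIKLMNOPQRSTUVWXYZ".toList) := by
    intro a ha
    exact (PySem.List.mem_dedup _ _).2 (List.mem_append_right _ ha)
  have := (List.subperm_of_subset (by decide) hsub).length_le
  simpa using this

theorem pv_inner_search {α : Type} (row : List Char) (c : Char) (f : Nat → α) :
    (List.range row.length).findSome?
      (fun ci => if c = row.getD ci ' ' then some (f ci) else none) =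
    (List.idxOf? c row).map f := by
  induction row generalizing f with
  | nil => rfl
  | cons x xs ih =>
    rw [List.length_cons, List.range_succ_eq_map, List.findSome?_cons, List.findSome?_map]
    by_cases hx : c = x
    · subst hx
      rw [← PySem.List.index?_eq_idxOf?, PySem.List.index?_cons_self]
      simp
    · rw [← PySem.List.index?_eq_idxOf?, PySem.List.index?_cons_of_ne _ (Ne.symm hx),
        PySem.List.index?_eq_idxOf?]
      have h2 : ((fun ci => if c = (x :: xs).getD ci ' ' then some (f ci) else none) ∘ Nat.succ)
          = (fun ci => if c = xs.getD ci ' ' then some ((f ∘ Nat.succ) ci) else none) := by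
        funext ci; simp [Function.comp]
      simp only [List.getD_cons_zero, if_neg hx, h2, ih (f ∘ Nat.succ)]
      cases List.idxOf? c xs <;> rfl

theorem pv_index?_append_left_not {α : Type} [BEq α] [LawfulBEq α] (l t : List α) (v : α)
    (h : v ∉ l) : List.idxOf? v (l ++ t) = (List.idxOf? v t).map (· + l.length) := by
  induction l with
  | nil => simp
  | cons x xs ih =>
    have hx : x ≠ v := fun hvx => h (hvx ▸ List.mem_cons_self ..)
    rw [List.cons_append, ← PySem.List.index?_eq_idxOf?, PySem.List.index?_cons_of_ne _ hx,
      PySem.List.index?_eq_idxOf?, ih (fun hv => h (List.mem_cons_of_mem _ hv))]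
    cases List.idxOf? v t with
    | none => simp
    | some k => simp; omega

theorem pv_rows_search {α : Type} (rows : List (List Char)) (c : Char) (f : Nat → Nat → α)
    (hw : ∀ r ∈ rows, r.length = 5) :
    (List.range rows.length).findSome? (fun ri =>
      (List.range 5).findSome? (fun ci =>
        if c = (rows.getD ri []).getD ci ' ' then some (f ri ci) else none)) =
    (List.idxOf? c rows.flatten).map (fun k => f (k / 5) (k % 5)) := by
  induction rows generalizing f with
  | nil => rfl
  | cons r rest ih =>
    have hr : r.length = 5 := hw r (List.mem_cons_self ..)
    rw [List.length_cons,
      show List.range (rest.length + 1) = 0 :: List.map Nat.succ (List.range rest.length) from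
        List.range_succ_eq_map,
      List.findSome?_cons, List.findSome?_map]
    have hinner : (List.range 5).findSome? (fun ci =>
        if c = ((r :: rest).getD 0 []).getD ci ' ' then some (f 0 ci) else none) =
        (List.idxOf? c r).map (fun ci => f 0 ci) := by
      rw [show (List.range 5) = List.range r.length from by rw [hr]]
      exact pv_inner_search r c (f 0)
    have htail : ((fun ri => (List.range 5).findSome? (fun ci =>
          if c = ((r :: rest).getD ri []).getD ci ' ' then some (f ri ci) else none)) ∘ Nat.succ)
        = (fun ri => (List.range 5).findSome? (fun ci =>
          if c = (rest.getD ri []).getD ci ' ' then some ((fun ri ci => f (ri + 1) ci) ri ci)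
          else none)) := by
      funext ri; simp [Function.comp]
    rw [List.flatten_cons]
    by_cases hc : c ∈ r
    · rw [← PySem.List.index?_eq_idxOf?, PySem.List.index?_append_of_mem _ hc,
        PySem.List.index?_eq_idxOf?]
      rcases hk : List.idxOf? c r with _ | k
      · exact absurd ((PySem.List.index?_isSome_iff r c).2 hc)
          (by rw [PySem.List.index?_eq_idxOf?, hk]; simp)
      · have hklt : k < 5 := by
          rcases PySem.List.getElem_of_index?_eq_some
            (xs := r) (v := c) (by rw [PySem.List.index?_eq_idxOf?, hk]) with ⟨hlt, -⟩
          omega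
        rw [hinner, hk]
        simp only [Option.map_some]
        rw [Nat.div_eq_of_lt hklt, Nat.mod_eq_of_lt hklt]
    · have hnone : List.idxOf? c r = none := by
        rw [← PySem.List.index?_eq_idxOf?, PySem.List.index?_eq_none_iff]; exact hc
      rw [hinner]
      simp only [hnone, Option.map_none]
      rw [htail, ih (fun ri ci => f (ri + 1) ci) (fun r hr => hw r (List.mem_cons_of_mem _ hr)),
        pv_index?_append_left_not r rest.flatten c hc, hr]
      cases List.idxOf? c rest.flatten with
      | none => rfl
      | some k =>
        simp only [Option.map_some]
        congr 1
        rw [Nat.add_div_right _ (by omega), Nat.add_mod_right]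

-- B's association-list lookup, characterized by the first index in the flat square
theorem pv_lookup_idx (flat : List Char) (s : Int) (c : Char) :
    List.lookup c ((PySem.List.enumerate flat s).map (fun p => (p.2, p.1))) =
    (List.idxOf? c flat).map (fun (k : Nat) => s + (k : Int)) := by
  induction flat generalizing s with
  | nil => rfl
  | cons x xs ih =>
    rw [PySem.List.enumerate_cons, List.map_cons, ← PySem.List.index?_eq_idxOf?]
    by_cases hx : c = x
    · subst hx
      rw [PySem.List.index?_cons_self]
      simp
    · rw [PySem.List.index?_cons_of_ne _ (Ne.symm hx), PySem.List.index?_eq_idxOf?]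
      have hbeq : (c == x) = false := by simp [hx]
      rw [List.lookup_cons, hbeq]
      simp only []
      rw [ih (s + 1)]
      cases List.idxOf? c xs with
      | none => rfl
      | some k =>
        simp only [Option.map_some]
        congr 1
        push_cast
        ring

theorem pv_flatMap_opt {β : Type} (msg : List Char) (G : Char → Option Nat) (u : Nat → List β) :
    (msg.flatMap (fun c => match G c with | some k => u k | none => [])) =
    (msg.filterMap G).flatMap u := by
  induction msg with
  | nil => rfl
  | cons x xs ih =>
    rw [List.flatMap_cons, List.filterMap_cons]
    cases hG : G x with
    | none => simpa using ih
    | some k => simp [ih]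

theorem pv_flatMap_gr (flat : List Char) (msg : List Char) :
    msg.flatMap (pvGR flat) = (msg.filterMap (pvG flat)).map (fun k => pvDig (k / 5)) := by
  have h := pv_flatMap_opt msg (pvG flat) (fun k => [pvDig (k / 5)])
  rw [← List.map_eq_flatMap] at h
  exact h

theorem pv_flatMap_gc (flat : List Char) (msg : List Char) :
    msg.flatMap (pvGC flat) = (msg.filterMap (pvG flat)).map (fun k => pvDig (k % 5)) := by
  have h := pv_flatMap_opt msg (pvG flat) (fun k => [pvDig (k % 5)])
  rw [← List.map_eq_flatMap] at h
  exact h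

theorem pv_dig_ne_space (x : Nat) (h : x < 5) : pvDig x ≠ ' ' := by
  interval_cases x <;> decide

theorem pv_dig_toStr (x : Nat) (h : x < 5) :
    (PySem.Int.toStr ((x : Int) + 1)).toList = [pvDig x] := by
  interval_cases x <;> decide

theorem pv_dig_ofStr (x : Nat) (h : x < 5) :
    (PySem.Int.ofStr? (String.ofList [pvDig x])).getD 0 - 1 = (x : Int) := by
  interval_cases x <;> decide

theorem pv_row_get (I : List Char) (h25 : 25 ≤ I.length) (a b : Nat) (ha : a < 5) (hb : b < 5) :
    ((I.drop (5 * a)).take 5).getD b ' ' = (I.take 25).getD (a * 5 + b) ' ' := by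
  have h1 : 5 * a + b < I.length := by omega
  have hb5 : b < ((I.drop (5 * a)).take 5).length := by
    rw [List.length_take, List.length_drop]; omega
  have hb25 : a * 5 + b < (I.take 25).length := by
    rw [List.length_take]; omega
  rw [List.getD_eq_getElem _ _ hb5, List.getD_eq_getElem _ _ hb25]
  rw [List.getElem_take, List.getElem_drop, List.getElem_take]
  congr 1
  omega

theorem pvPairs_ind {motive : List Nat → Prop} (h0 : motive []) (h1 : ∀ a, motive [a])
    (h2 : ∀ a b r, motive r → motive (a :: b :: r)) : ∀ t, motive t
  | [] => h0
  | [a] => h1 a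
  | a :: b :: r => h2 a b r (pvPairs_ind h0 h1 h2 r)

theorem pv_decrypt_pairs (I : List Char) (h25 : 25 ≤ I.length) (t : List Nat)
    (ht : ∀ x ∈ t, x < 5) :
    polybius_decrypt_go
      [(I.drop 0).take 5, (I.drop 5).take 5, (I.drop 10).take 5, (I.drop 15).take 5,
        (I.drop 20).take 5] (t.map pvDig) = pvPairs (I.take 25) t := by
  revert ht
  induction t using pvPairs_ind with
  | h0 => intro _; rfl
  | h1 a =>
    intro ht
    have ha : a < 5 := ht a (by simp)
    rw [List.map_cons, List.map_nil]
    show polybius_decrypt_go _ [pvDig a] = _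
    rw [polybius_decrypt_go, if_neg (pv_dig_ne_space a ha)]
    rfl
  | h2 a b r ih =>
    intro ht
    have ha : a < 5 := ht a (by simp)
    have hb : b < 5 := ht b (by simp)
    rw [List.map_cons, List.map_cons]
    show polybius_decrypt_go _ (pvDig a :: pvDig b :: r.map pvDig) = _
    rw [polybius_decrypt_go, if_neg (pv_dig_ne_space a ha)]
    rw [pv_dig_ofStr a ha, pv_dig_ofStr b hb, PySem.List.pyGetD_natCast, PySem.List.pyGetD_natCast]
    rw [ih (fun x hx => ht x (by simp [hx]))]
    show (_ : Char) :: _ = pvPairs _ (a :: b :: r)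
    rw [pvPairs]
    congr 1
    have hgetD : ([(I.drop 0).take 5, (I.drop 5).take 5, (I.drop 10).take 5, (I.drop 15).take 5,
        (I.drop 20).take 5].getD a []) = (I.drop (5 * a)).take 5 := by
      interval_cases a <;> norm_num
    rw [hgetD, pv_row_get I h25 a b ha hb]

-- B: reading the virtual rows-then-cols sequence at position v by index arithmetic
theorem pv_coord (kseq : List Nat) (v : Nat) (hv : v < 2 * kseq.length) :
    (if ((v : Nat) : Int) < (kseq.length : Int)
       then PySem.Int.floordiv
              (PySem.List.pyGetD (kseq.map (fun k : Nat => (k : Int))) ((v : Nat) : Int) 0) 5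
       else PySem.Int.mod
              (PySem.List.pyGetD (kseq.map (fun k : Nat => (k : Int)))
                (((v : Nat) : Int) - (kseq.length : Int)) 0) 5)
    = (((kseq.map (fun k => k / 5) ++ kseq.map (fun k => k % 5)).getD v 0 : Nat) : Int) := by
  have hlm : (kseq.map (fun k => k / 5)).length = kseq.length := List.length_map ..
  by_cases hvn : v < kseq.length
  · rw [if_pos (by exact_mod_cast hvn), PySem.List.pyGetD_natCast]
    have hvm : v < (kseq.map (fun k : Nat => (k : Int))).length := by
      rw [List.length_map]; exact hvn
    have hvl : v < (kseq.map (fun k => k / 5)).length := by omega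
    rw [List.getD_eq_getElem _ _ hvm, List.getD_append _ _ _ _ hvl,
      List.getD_eq_getElem _ _ hvl, List.getElem_map, List.getElem_map]
    exact_mod_cast PySem.Int.floordiv_natCast kseq[v] 5
  · rw [if_neg (by exact_mod_cast hvn),
      show ((v : Nat) : Int) - (kseq.length : Int) = ((v - kseq.length : Nat) : Int) from by
        push_cast [Nat.cast_sub (by omega : kseq.length ≤ v)]; ring,
      PySem.List.pyGetD_natCast]
    have hw : v - kseq.length < kseq.length := by omega
    have hwm : v - kseq.length < (kseq.map (fun k : Nat => (k : Int))).length := by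
      rw [List.length_map]; exact hw
    have hwc : v - kseq.length < (kseq.map (fun k => k % 5)).length := by
      rw [List.length_map]; exact hw
    rw [List.getD_eq_getElem _ _ hwm, List.getD_append_right _ _ _ _ (by omega),
      hlm, List.getD_eq_getElem _ _ hwc, List.getElem_map, List.getElem_map]
    exact_mod_cast PySem.Int.mod_natCast kseq[v - kseq.length] 5

-- B: the range-indexed output equals the pairwise walk over the coordinate sequence
theorem pv_index_pairs (flat : List Char) (n : Nat) :
    ∀ (t : List Nat), t.length = 2 * n →
    (List.range n).map (fun m =>
      flat.getD (5 * t.getD (2 * m) 0 + t.getD (2 * m + 1) 0) ' ') = pvPairs flat t := by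
  induction n with
  | zero =>
    intro t ht
    have ht0 : t = [] := List.length_eq_zero_iff.1 (by omega)
    subst ht0
    rfl
  | succ n ih =>
    intro t ht
    match t, ht with
    | a :: b :: r, ht =>
      have hr : r.length = 2 * n := by simp only [List.length_cons] at ht; omega
      rw [List.range_succ_eq_map, List.map_cons, List.map_map]
      rw [show pvPairs flat (a :: b :: r) = flat.getD (a * 5 + b) ' ' :: pvPairs flat r from rfl]
      congr 1
      · simp only [Nat.mul_zero, List.getD_cons_zero, List.getD_cons_succ]
        rw [Nat.mul_comm 5 a]
      · rw [← ih r hr]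
        apply List.map_congr_left
        intro m _
        simp only [Function.comp_apply]
        congr 2

-- ===== VERDICT (by name: the statement is the Claim_ definition above) =====
theorem bifid_encrypt_spec : Claim_equal_bifid_encrypt := by
  intro message key _
  show bifid_encrypt message key = bifid_encrypt_alt message key
  set L := (PySem.Str.upper key ++ "ABCDEFGHIKLMNOPQRSTUVWXYZ").toList with hL
  set I := PySem.List.dedup L with hI
  set flat := I.take 25 with hflat
  set msg := PySem.Chars.replace (PySem.Chars.upper message.toList) ['J'] ['I'] with hmsg
  set kseq := msg.filterMap (pvG flat) with hkseq
  set t : List Nat := kseq.map (fun k => k / 5) ++ kseq.map (fun k => k % 5) with ht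
  have h25 : 25 ≤ I.length := by
    rw [hI, hL, String.toList_append]; exact pv_len25 _
  have hfl : flat.length = 25 := by rw [hflat, List.length_take]; omega
  have hkb : ∀ k ∈ kseq, k < 25 := by
    intro k hk
    rw [hkseq] at hk
    rcases List.mem_filterMap.1 hk with ⟨c, -, hGc⟩
    by_cases hc : c = ' '
    · simp [pvG, hc] at hGc
    · simp only [pvG, hc, reduceIte] at hGc
      rcases PySem.List.getElem_of_index?_eq_some (xs := flat) (v := c) (k := k)
        (by rw [PySem.List.index?_eq_idxOf?]; exact hGc) with ⟨hlt, -⟩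
      omega
  have htlt : ∀ x ∈ t, x < 5 := by
    intro x hx
    rw [ht] at hx
    rcases List.mem_append.1 hx with h | h <;> rcases List.mem_map.1 h with ⟨k, hk, rfl⟩
    · have := hkb k hk; omega
    · omega
  have htlen : t.length = 2 * kseq.length := by
    rw [ht, List.length_append, List.length_map, List.length_map]; omega
  have hdedup : ∀ (l : List Char),
      l.foldl (fun acc c => if c ∈ acc then acc else acc ++ [c]) [] = PySem.List.dedup l :=
    fun l => (pv_foldl_dedup l []).trans rfl
  have htable : polybius_make_table (PySem.Str.upper key) =
      [I.take 5, (I.drop 5).take 5, (I.drop 10).take 5, (I.drop 15).take 5, (I.drop 20).take 5] := by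
    simp only [polybius_make_table, hdedup, ← hL, ← hI]
    rw [show PySem.List.pyRange 0 25 5 = [(0:Int),5,10,15,20] from by decide]
    simp only [List.foldl_cons, List.foldl_nil, List.nil_append]
    norm_num [PySem.List.slice_toNat, show Int.toNat 0 = 0 from rfl, show Int.toNat 5 = 5 from rfl,
      show Int.toNat 10 = 10 from rfl, show Int.toNat 15 = 15 from rfl,
      show Int.toNat 20 = 20 from rfl, show Int.toNat 25 = 25 from rfl]
  have hrows : ∀ r ∈ [I.take 5, (I.drop 5).take 5, (I.drop 10).take 5, (I.drop 15).take 5,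
      (I.drop 20).take 5], r.length = 5 := by
    intro r hr
    simp only [List.mem_cons, List.not_mem_nil, or_false] at hr
    rcases hr with rfl | rfl | rfl | rfl | rfl <;>
      simp only [List.length_take, List.length_drop] <;> omega
  have hflatten : [I.take 5, (I.drop 5).take 5, (I.drop 10).take 5, (I.drop 15).take 5,
      (I.drop 20).take 5].flatten = flat := by
    simp only [List.flatten_cons, List.flatten_nil, List.append_nil]
    rw [hflat, show (25:Nat) = 5 + (5 + (5 + (5 + 5))) from rfl,
      List.take_add, List.take_add, List.take_add, List.take_add]
    simp only [List.drop_drop]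
  have hsearch : ∀ c, polybius_search c (polybius_make_table (PySem.Str.upper key)) =
      (List.idxOf? c flat).map (fun k => (k / 5, k % 5)) := by
    intro c
    rw [htable]
    have hu : polybius_search c [I.take 5, (I.drop 5).take 5, (I.drop 10).take 5,
        (I.drop 15).take 5, (I.drop 20).take 5] =
        (List.range ([I.take 5, (I.drop 5).take 5, (I.drop 10).take 5, (I.drop 15).take 5,
          (I.drop 20).take 5].length)).findSome? (fun ri =>
          (List.range 5).findSome? (fun ci =>
            if c = ([I.take 5, (I.drop 5).take 5, (I.drop 10).take 5, (I.drop 15).take 5,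
              (I.drop 20).take 5].getD ri []).getD ci ' ' then some (ri, ci) else none)) := by
      simp only [polybius_search]
      rw [show ([I.take 5, (I.drop 5).take 5, (I.drop 10).take 5, (I.drop 15).take 5,
        (I.drop 20).take 5].getD 0 []).length = 5 from by
          simp only [List.getD_cons_zero, List.length_take]; omega]
    rw [hu, pv_rows_search _ c (fun ri ci => (ri, ci)) hrows, hflatten]
  -- A's value
  have hA : bifid_encrypt message key = String.ofList (pvPairs flat t) := by
    simp only [bifid_encrypt, ← hmsg]
    have hstepeq : (fun (acc : List Char × List Char) character =>
        if character = ' ' then acc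
        else
          match polybius_search character (polybius_make_table (PySem.Str.upper key)) with
          | some (i, j) =>
              (acc.1 ++ (PySem.Int.toStr ((i : Int) + 1)).toList,
               acc.2 ++ (PySem.Int.toStr ((j : Int) + 1)).toList)
          | none => acc) =
        (fun acc c => (acc.1 ++ pvGR flat c, acc.2 ++ pvGC flat c)) := by
      funext acc c
      by_cases hc : c = ' '
      · simp [hc, pvGR, pvGC, pvG]
      · rw [if_neg hc, hsearch c]
        simp only [pvGR, pvGC, pvG, hc, reduceIte]
        cases hk : List.idxOf? c flat with
        | none => simp
        | some k =>
          have hklt : k < 25 := by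
            rcases PySem.List.getElem_of_index?_eq_some (xs := flat) (v := c) (k := k)
              (by rw [PySem.List.index?_eq_idxOf?]; exact hk) with ⟨hlt, -⟩
            omega
          simp only [Option.map_some]
          rw [pv_dig_toStr (k / 5) (by omega), pv_dig_toStr (k % 5) (by omega)]
    rw [hstepeq, PySem.List.foldl_prod_mk (f := fun a c => a ++ pvGR flat c)
        (g := fun a c => a ++ pvGC flat c),
      PySem.List.foldl_append_eq_flatMap, PySem.List.foldl_append_eq_flatMap,
      List.nil_append, List.nil_append, pv_flatMap_gr, pv_flatMap_gc, ← hkseq]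
    simp only [polybius_decrypt, htable]
    rw [if_neg (by simp : ¬([I.take 5, (I.drop 5).take 5, (I.drop 10).take 5, (I.drop 15).take 5,
      (I.drop 20).take 5] = []))]
    rw [show kseq.map (fun k => pvDig (k / 5)) = (kseq.map (fun k => k / 5)).map pvDig from by
        rw [List.map_map]; rfl,
      show kseq.map (fun k => pvDig (k % 5)) = (kseq.map (fun k => k % 5)).map pvDig from by
        rw [List.map_map]; rfl,
      ← List.map_append, ← ht]
    have h := pv_decrypt_pairs I h25 t htlt
    rw [List.drop_zero] at h
    rw [h, ← hflat]
  -- B's value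
  have hB : bifid_encrypt_alt message key = String.ofList (pvPairs flat t) := by
    simp only [bifid_encrypt_alt, ← hmsg, ← hL, ← hI, ← hflat]
    have hlook : ∀ c, (if c ≠ ' '
        then List.lookup c ((PySem.List.enumerate flat).map (fun p => (p.2, p.1)))
        else none) = (pvG flat c).map (fun k : Nat => (k : Int)) := by
      intro c
      by_cases hc : c = ' '
      · simp [hc, pvG]
      · rw [if_pos hc, pv_lookup_idx flat 0 c]
        simp [pvG, hc]
    have hks : msg.filterMap (fun ch => if ch ≠ ' '
        then List.lookup ch ((PySem.List.enumerate flat).map (fun p => (p.2, p.1)))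
        else none) = kseq.map (fun k : Nat => (k : Int)) := by
      simp only [hlook]
      rw [hkseq, List.map_filterMap]
    rw [hks, List.length_map]
    congr 1
    rw [← pv_index_pairs flat kseq.length t htlen]
    apply List.map_congr_left
    intro m hm
    have hm' : m < kseq.length := List.mem_range.1 hm
    have e1 := pv_coord kseq (2 * m) (by omega)
    have e2 := pv_coord kseq (2 * m + 1) (by omega)
    rw [show (2 : Int) * (m : Int) = ((2 * m : Nat) : Int) from by push_cast; ring,
      show ((2 * m : Nat) : Int) + 1 = ((2 * m + 1 : Nat) : Int) from by push_cast; ring,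
      e1, e2, ← ht,
      show (5 : Int) * ((t.getD (2 * m) 0 : Nat) : Int) + ((t.getD (2 * m + 1) 0 : Nat) : Int)
        = ((5 * t.getD (2 * m) 0 + t.getD (2 * m + 1) 0 : Nat) : Int) from by push_cast; ring,
      PySem.List.pyGetD_natCast]
  rw [hA, hB]
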